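-- pv_equiv track=rewrite | github.com/mqq-marek/ProjectEuler | ProjectEuler/core.py | moving_pairs
-- ===== SOURCE A (Python) =====
-- from typing import Iterator, Sequence, TypeVar, Callable, Iterable, Tuple, List
--
-- def moving_pairs(iterable: Iterable) -> Iterator:
--     """
--     Generate moving pair elements over iterable.
--     e.g. (1, 2), (2, 3) from iterable 1, 2, 3.
--     :param iterable:
--     :yields: moving pair on iterable
--     """
--     iterator = iter(iterable)
--
--     try:
--         previous = next(iterator)
--     except StopIteration:
--         return
--
--     for current in iterator:
--         yield previous, current
--         previous = current
-- ===== SOURCE B (Python) =====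
-- def moving_pairs(iterable):
--     # Idiomatic: materialize once and zip the list with its tail.
--     xs = list(iterable)
--     return zip(xs, xs[1:])
-- ===== Notes on version B (the rewrite author's own statement) =====
-- stated objective: idiomatic
-- what changed: Replaces the explicit iter/next loop with a manually carried 'previous' variable by zipping the sequence with its own tail (zip(xs, xs[1:])).
import Mathlib
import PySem

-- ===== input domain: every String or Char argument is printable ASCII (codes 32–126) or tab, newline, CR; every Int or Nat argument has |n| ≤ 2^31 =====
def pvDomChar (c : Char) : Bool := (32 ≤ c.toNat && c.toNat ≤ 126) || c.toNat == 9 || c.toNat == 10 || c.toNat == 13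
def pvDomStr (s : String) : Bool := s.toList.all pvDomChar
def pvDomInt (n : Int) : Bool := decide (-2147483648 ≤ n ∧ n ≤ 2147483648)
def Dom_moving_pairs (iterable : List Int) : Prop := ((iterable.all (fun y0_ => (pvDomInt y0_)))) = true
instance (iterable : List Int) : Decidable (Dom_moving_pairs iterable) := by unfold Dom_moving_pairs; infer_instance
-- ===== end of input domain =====

-- ===== PORT A =====
-- A: iter/next loop carrying 'previous'; transcribed as structural recursion over the list.
def movingPairsLoop (previous : Int) (rest : List Int) : List (Int × Int) :=
  match rest with
  | [] => []
  | current :: rest' => (previous, current) :: movingPairsLoop current rest'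

def moving_pairs (iterable : List Int) : List (Int × Int) :=
  match iterable with
  | [] => []            -- next(iterator) raises StopIteration: return
  | previous :: rest => movingPairsLoop previous rest

-- ===== PORT B =====
-- B: zip the list with its tail (xs[1:]); 'idiomatic' objective, return-value equivalence only (A yields lazily).
def moving_pairs_alt (iterable : List Int) : List (Int × Int) :=
  List.zip iterable (PySem.List.slice iterable (some 1) none)

-- ===== PRECONDITION & SPEC =====
def Spec_moving_pairs (iterable : List Int) (out : List (Int × Int)) : Prop := out = moving_pairs_alt iterable
instance (iterable : List Int) (out : List (Int × Int)) : Decidable (Spec_moving_pairs iterable out) := by unfold Spec_moving_pairs; infer_instance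

-- ===== CLAIM (what is proved, stated in full; the proofs are below) =====
def Claim_equal_moving_pairs : Prop := ∀ (iterable : List Int), Dom_moving_pairs iterable → Spec_moving_pairs iterable (moving_pairs iterable)

-- ===== LEMMAS AND PROOFS =====

-- ===== VERDICT (by name: the statement is the Claim_ definition above) =====
theorem movingPairsLoop_eq_zip (p : Int) (rest : List Int) :
    movingPairsLoop p rest = List.zip (p :: rest) rest := by
  induction rest generalizing p with
  | nil => rfl
  | cons c r ih => simp [movingPairsLoop, ih]

theorem moving_pairs_spec : Claim_equal_moving_pairs := by
  intro xs _
  unfold Spec_moving_pairs moving_pairs moving_pairs_alt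
  cases xs with
  | nil => rfl
  | cons p rest => simp only [PySem.List.slice_from_one]; rw [movingPairsLoop_eq_zip]; rfl
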